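-- pv_equiv track=rewrite | github.com/sandeepseth5/experiment | python/largest_x_new.py | traverse_from_top_left
-- ===== SOURCE A (Python) =====
-- def traverse_from_top_left(matrix, aux_matrix):
--     for i in range(len(matrix)):
--         for j in range(len(matrix[0])):
--             if i == 0 or j == 0:
--                 aux_matrix[i][j] = matrix[i][j]
--             elif matrix[i][j] == 1 and aux_matrix[i-1][j-1] > 0:
--                 aux_matrix[i][j] = aux_matrix[i-1][j-1] + 1
--             else:
--                 aux_matrix[i][j] = matrix[i][j]
--     return aux_matrix
-- ===== SOURCE B (Python) =====
-- def traverse_from_top_left(matrix, aux_matrix):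
--     # Anti-diagonal traversal with an explicit running count per diagonal
--     # (mutates aux_matrix in place, like the original, and returns it).
--     rows = len(matrix)
--     if rows == 0:
--         return aux_matrix
--     cols = len(matrix[0])
--     if cols == 0:
--         return aux_matrix
--     starts = [(i, 0) for i in range(rows)] + [(0, j) for j in range(1, cols)]
--     for (i0, j0) in starts:
--         count = matrix[i0][j0]
--         aux_matrix[i0][j0] = count
--         i, j = i0 + 1, j0 + 1
--         while i < rows and j < cols:
--             if matrix[i][j] == 1 and count > 0:
--                 count = count + 1
--             else:
--                 count = matrix[i][j]
--             aux_matrix[i][j] = count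
--             i += 1
--             j += 1
--     return aux_matrix
-- ===== Notes on version B (the rewrite author's own statement) =====
-- stated objective: alternative
-- what changed: B traverses the grid by down-right anti-diagonals, enumerating each diagonal's border start cell and carrying the run value in an explicit accumulator, so the DP predecessor is never re-read from aux_matrix; A fills row-major reading aux_matrix[i-1][j-1].
import Mathlib
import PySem

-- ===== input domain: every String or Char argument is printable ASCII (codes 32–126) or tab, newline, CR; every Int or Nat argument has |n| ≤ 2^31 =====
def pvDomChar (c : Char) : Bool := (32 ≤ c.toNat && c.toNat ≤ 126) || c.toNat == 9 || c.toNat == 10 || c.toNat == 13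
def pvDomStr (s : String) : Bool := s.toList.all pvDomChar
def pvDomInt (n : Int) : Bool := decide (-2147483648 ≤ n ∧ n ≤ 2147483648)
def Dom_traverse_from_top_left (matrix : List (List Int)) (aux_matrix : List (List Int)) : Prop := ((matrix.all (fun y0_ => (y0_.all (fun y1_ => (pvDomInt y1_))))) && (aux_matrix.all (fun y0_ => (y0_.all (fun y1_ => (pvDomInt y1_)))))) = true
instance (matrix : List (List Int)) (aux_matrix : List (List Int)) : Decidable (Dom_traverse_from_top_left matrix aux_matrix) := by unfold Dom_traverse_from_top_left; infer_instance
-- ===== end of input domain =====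

-- B fills the DP table by anti-diagonals with an explicit running accumulator instead of
-- row-major re-reads of aux_matrix; same values, same in-place mutation of aux_matrix in Python.

-- shared index helpers (Python m[i][j] read with default / single-cell write)
def get2 (s : List (List Int)) (i j : Nat) : Int := (s.getD i []).getD j 0

def set2 (s : List (List Int)) (i j : Nat) (v : Int) : List (List Int) :=
  s.set i ((s.getD i []).set j v)

-- ===== PORT A =====
def traverse_from_top_left (matrix : List (List Int)) (aux_matrix : List (List Int)) : List (List Int) :=
  (List.range matrix.length).foldl (fun s i =>
    (List.range (matrix.headD []).length).foldl (fun s j =>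
      if i = 0 ∨ j = 0 then
        set2 s i j (get2 matrix i j)
      else if get2 matrix i j = 1 ∧ get2 s (i-1) (j-1) > 0 then
        set2 s i j (get2 s (i-1) (j-1) + 1)
      else
        set2 s i j (get2 matrix i j)) s) aux_matrix

-- ===== PORT B =====
-- the while-loop walking one diagonal from (i,j), carrying the running count
def runDiag (m : List (List Int)) (R C : Nat) (i j : Nat) (count : Int)
    (s : List (List Int)) : List (List Int) :=
  if h : i < R ∧ j < C then
    let c := if get2 m i j = 1 ∧ count > 0 then count + 1 else get2 m i j
    runDiag m R C (i+1) (j+1) c (set2 s i j c)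
  else s
termination_by R - i
decreasing_by omega

def traverse_from_top_left_alt (matrix : List (List Int)) (aux_matrix : List (List Int)) : List (List Int) :=
  if matrix.length = 0 then aux_matrix
  else if (matrix.headD []).length = 0 then aux_matrix
  else
    let R := matrix.length
    let C := (matrix.headD []).length
    let starts := (List.range R).map (fun i => (i, 0)) ++ (List.range' 1 (C-1)).map (fun j => (0, j))
    starts.foldl (fun s p =>
      let c := get2 matrix p.1 p.2
      runDiag matrix R C (p.1+1) (p.2+1) c (set2 s p.1 p.2 c)) aux_matrix

-- ===== PRECONDITION & SPEC =====
-- Pre_ excludes exactly the inputs where Python A raises an IndexError: a matrix row or an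
-- aux row shorter than len(matrix[0]) among the first len(matrix) rows, or too few aux rows.
def Pre_traverse_from_top_left (matrix : List (List Int)) (aux_matrix : List (List Int)) : Prop :=
  matrix.length ≤ aux_matrix.length ∧
  ∀ i < matrix.length,
    (matrix.headD []).length ≤ (matrix.getD i []).length ∧
    (matrix.headD []).length ≤ (aux_matrix.getD i []).length

instance (matrix : List (List Int)) (aux_matrix : List (List Int)) : Decidable (Pre_traverse_from_top_left matrix aux_matrix) := by
  unfold Pre_traverse_from_top_left; infer_instance

def pvWitness_traverse_from_top_left : List (List Int) × List (List Int) :=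
  ([[1, 1, 0], [0, 1, 1], [1, 0, 1]], [[0, 0, 0], [0, 0, 0], [0, 0, 0]])

def Spec_traverse_from_top_left (matrix : List (List Int)) (aux_matrix : List (List Int)) (out : List (List Int)) : Prop := out = traverse_from_top_left_alt matrix aux_matrix
instance (matrix : List (List Int)) (aux_matrix : List (List Int)) (out : List (List Int)) : Decidable (Spec_traverse_from_top_left matrix aux_matrix out) := by unfold Spec_traverse_from_top_left; infer_instance

-- ===== CLAIM (what is proved, stated in full; the proofs are below) =====
def Claim_equal_traverse_from_top_left : Prop := ∀ (matrix : List (List Int)) (aux_matrix : List (List Int)), Dom_traverse_from_top_left matrix aux_matrix → Pre_traverse_from_top_left matrix aux_matrix → Spec_traverse_from_top_left matrix aux_matrix (traverse_from_top_left matrix aux_matrix)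

-- ===== LEMMAS AND PROOFS =====

def rowlen (s : List (List Int)) (i : Nat) : Nat := (s.getD i []).length

-- the value both programs leave at cell (i,j) of the filled region
def fval (m : List (List Int)) : Nat → Nat → Int
  | 0, j => get2 m 0 j
  | i+1, 0 => get2 m (i+1) 0
  | i+1, j+1 => if get2 m (i+1) (j+1) = 1 ∧ fval m i j > 0 then fval m i j + 1 else get2 m (i+1) (j+1)

lemma fval_border (m : List (List Int)) (i j : Nat) (h : i = 0 ∨ j = 0) :
    fval m i j = get2 m i j := by
  rcases h with h | h <;> subst h
  · cases j <;> simp [fval]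
  · cases i <;> simp [fval]

lemma fval_succ (m : List (List Int)) (i j : Nat) :
    fval m (i+1) (j+1) = if get2 m (i+1) (j+1) = 1 ∧ fval m i j > 0 then fval m i j + 1 else get2 m (i+1) (j+1) := rfl

-- state invariant: same shape as aux, fval on P, untouched elsewhere
def Agree (m aux : List (List Int)) (P : Nat → Nat → Prop) (s : List (List Int)) : Prop :=
  s.length = aux.length ∧ (∀ a, rowlen s a = rowlen aux a) ∧
  (∀ a b, P a b → get2 s a b = fval m a b) ∧
  (∀ a b, ¬ P a b → get2 s a b = get2 aux a b)

lemma agree_congr {m aux : List (List Int)} {P Q : Nat → Nat → Prop} {s : List (List Int)}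
    (h : ∀ a b, P a b ↔ Q a b) (hs : Agree m aux P s) : Agree m aux Q s := by
  obtain ⟨h1, h2, h3, h4⟩ := hs
  exact ⟨h1, h2, fun a b hq => h3 a b ((h a b).mpr hq),
         fun a b hq => h4 a b (fun hp => hq ((h a b).mp hp))⟩

lemma length_set2 (s : List (List Int)) (i j : Nat) (v : Int) :
    (set2 s i j v).length = s.length := by simp [set2]

lemma rowlen_set2 (s : List (List Int)) (i j : Nat) (v : Int) (a : Nat) :
    rowlen (set2 s i j v) a = rowlen s a := by
  by_cases hi : i < s.length
  · by_cases hai : a = i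
    · subst hai
      simp [rowlen, set2, List.getD, hi]
    · simp [rowlen, set2, List.getD, List.getElem?_set_ne (Ne.symm hai)]
  · simp [rowlen, set2, List.set_eq_of_length_le (by omega : s.length ≤ i)]

lemma get2_set2_self (s : List (List Int)) (i j : Nat) (v : Int)
    (hi : i < s.length) (hj : j < rowlen s i) : get2 (set2 s i j v) i j = v := by
  have hj' : j < s[i].length := by
    simpa [rowlen, List.getD, List.getElem?_eq_getElem, hi] using hj
  simp [get2, set2, List.getD, hi, hj', List.getElem?_eq_getElem]

lemma get2_set2_ne (s : List (List Int)) (i j : Nat) (v : Int) (a b : Nat)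
    (h : a ≠ i ∨ b ≠ j) : get2 (set2 s i j v) a b = get2 s a b := by
  by_cases hai : a = i
  · subst hai
    have hb : b ≠ j := by tauto
    by_cases hi : a < s.length
    · simp [get2, set2, List.getD, hi, List.getElem?_set_ne (Ne.symm hb)]
    · simp [get2, set2, List.set_eq_of_length_le (by omega : s.length ≤ a)]
  · simp [get2, set2, List.getD, List.getElem?_set_ne (Ne.symm hai)]

-- one write of the correct fval value extends the invariant by that cell
lemma agree_write {m aux : List (List Int)} {P : Nat → Nat → Prop} {s : List (List Int)}
    (hs : Agree m aux P s) (i j : Nat)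
    (hi : i < aux.length) (hj : j < rowlen aux i) :
    Agree m aux (fun a b => P a b ∨ (a = i ∧ b = j)) (set2 s i j (fval m i j)) := by
  obtain ⟨h1, h2, h3, h4⟩ := hs
  refine ⟨by rw [length_set2]; exact h1, fun a => by rw [rowlen_set2]; exact h2 a, ?_, ?_⟩
  · intro a b hab
    by_cases hc : a = i ∧ b = j
    · obtain ⟨rfl, rfl⟩ := hc
      exact get2_set2_self s a b _ (by omega) (by rw [h2]; exact hj)
    · have : a ≠ i ∨ b ≠ j := by tauto
      rw [get2_set2_ne s i j _ a b this]
      exact h3 a b (by tauto)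
  · intro a b hab
    push_neg at hab
    have : a ≠ i ∨ b ≠ j := by tauto
    rw [get2_set2_ne s i j _ a b this]
    exact h4 a b hab.1

-- ===== characterisation of B =====
lemma runDiag_agree (m aux : List (List Int)) (R C : Nat)
    (hRa : R ≤ aux.length) (hCa : ∀ a < R, C ≤ rowlen aux a) :
    ∀ (n i j : Nat) (count : Int) (s : List (List Int)) (P : Nat → Nat → Prop),
      R - i ≤ n → 0 < i → 0 < j → count = fval m (i-1) (j-1) → Agree m aux P s →
      Agree m aux (fun a b => P a b ∨ (i ≤ a ∧ a < R ∧ j ≤ b ∧ b < C ∧ a - i = b - j))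
        (runDiag m R C i j count s) := by
  intro n
  induction n with
  | zero =>
    intro i j count s P hn hi hj hcount hs
    have hiR : R ≤ i := by omega
    rw [runDiag]
    have : ¬ (i < R ∧ j < C) := by omega
    rw [dif_neg this]
    refine agree_congr (fun a b => ⟨fun h => Or.inl h, fun h => ?_⟩) hs
    rcases h with h | h
    · exact h
    · omega
  | succ n ih =>
    intro i j count s P hn hi hj hcount hs
    rw [runDiag]
    by_cases h : i < R ∧ j < C
    · rw [dif_pos h]
      obtain ⟨i', rfl⟩ : ∃ i', i = i' + 1 := ⟨i - 1, by omega⟩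
      obtain ⟨j', rfl⟩ : ∃ j', j = j' + 1 := ⟨j - 1, by omega⟩
      simp only [Nat.add_sub_cancel] at hcount
      have hc : (if get2 m (i'+1) (j'+1) = 1 ∧ count > 0 then count + 1 else get2 m (i'+1) (j'+1))
          = fval m (i'+1) (j'+1) := by rw [fval_succ, hcount]
      rw [hc]
      have hw := agree_write hs (i'+1) (j'+1) (by omega) (by have := hCa (i'+1) h.1; omega)
      have := ih (i'+2) (j'+2) (fval m (i'+1) (j'+1)) _ _ (by omega) (by omega) (by omega)
        (by simp) hw
      refine agree_congr (fun a b => ?_) this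
      constructor
      · rintro ((hp | hc) | hd)
        · tauto
        · right; omega
        · right; omega
      · rintro (hp | hd)
        · tauto
        · by_cases hha : a = i' + 1
          · left; right; omega
          · right; omega
    · rw [dif_neg h]
      refine agree_congr (fun a b => ?_) hs
      constructor
      · tauto
      · rintro (hp | hd)
        · exact hp
        · omega

-- one diagonal cell set: membership description of the cells a start covers
lemma foldStarts_agree (m aux : List (List Int)) (R C : Nat)
    (hRa : R ≤ aux.length) (hCa : ∀ a < R, C ≤ rowlen aux a) :
    ∀ (ts : List (Nat × Nat)) (s : List (List Int)) (P : Nat → Nat → Prop),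
      (∀ p ∈ ts, p.1 < R ∧ p.2 < C ∧ (p.1 = 0 ∨ p.2 = 0)) → Agree m aux P s →
      Agree m aux (fun a b => P a b ∨ ∃ p ∈ ts, ∃ k, a = p.1 + k ∧ b = p.2 + k ∧ a < R ∧ b < C)
        (ts.foldl (fun s p =>
          let c := get2 m p.1 p.2
          runDiag m R C (p.1+1) (p.2+1) c (set2 s p.1 p.2 c)) s) := by
  intro ts
  induction ts with
  | nil =>
    intro s P hts hs
    simpa using agree_congr (fun a b => by simp) hs
  | cons p ts ih =>
    intro s P hts hs
    obtain ⟨hp1, hp2, hp3⟩ := hts p (List.mem_cons_self ..)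
    simp only [List.foldl_cons]
    have hcv : get2 m p.1 p.2 = fval m p.1 p.2 := (fval_border m p.1 p.2 hp3).symm
    rw [hcv]
    have hw := agree_write hs p.1 p.2 (by omega) (by have := hCa p.1 hp1; omega)
    have hr := runDiag_agree m aux R C hRa hCa (R - (p.1+1)) (p.1+1) (p.2+1)
      (fval m p.1 p.2) _ _ (le_refl _) (by omega) (by omega) (by simp) hw
    have := ih _ _ (fun q hq => hts q (List.mem_cons_of_mem _ hq)) hr
    refine agree_congr (fun a b => ?_) this
    constructor
    · rintro (((hp | hc) | hd) | ⟨q, hq, k, hk⟩)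
      · tauto
      · exact Or.inr ⟨p, List.mem_cons_self .., 0, by omega⟩
      · exact Or.inr ⟨p, List.mem_cons_self .., a - p.1, by omega⟩
      · exact Or.inr ⟨q, List.mem_cons_of_mem _ hq, k, hk⟩
    · rintro (hp | ⟨q, hq, k, hk⟩)
      · tauto
      · rcases List.mem_cons.mp hq with rfl | hq
        · rcases Nat.eq_zero_or_pos k with rfl | hk0
          · left; left; right; omega
          · left; right; omega
        · right; exact ⟨q, hq, k, hk⟩

lemma charB (matrix aux : List (List Int))
    (hRa : matrix.length ≤ aux.length)
    (hCa : ∀ a < matrix.length, (matrix.headD []).length ≤ rowlen aux a) :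
    Agree matrix aux (fun a b => a < matrix.length ∧ b < (matrix.headD []).length)
      (traverse_from_top_left_alt matrix aux) := by
  set R := matrix.length with hR
  set C := (matrix.headD []).length with hC
  have agree_aux : Agree matrix aux (fun _ _ => False) aux :=
    ⟨rfl, fun a => rfl, fun a b h => h.elim, fun a b _ => rfl⟩
  by_cases hR0 : R = 0
  · rw [traverse_from_top_left_alt, if_pos hR0]
    exact agree_congr (fun a b => ⟨fun h => h.elim, fun h => by omega⟩) agree_aux
  · by_cases hC0 : C = 0
    · rw [traverse_from_top_left_alt, if_neg hR0, if_pos hC0]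
      exact agree_congr (fun a b => by constructor <;> [tauto; (intro h; omega)]) agree_aux
    · rw [traverse_from_top_left_alt, if_neg hR0, if_neg hC0]
      have hts : ∀ p ∈ (List.range R).map (fun i => (i, 0)) ++ (List.range' 1 (C-1)).map (fun j => (0, j)),
          p.1 < R ∧ p.2 < C ∧ (p.1 = 0 ∨ p.2 = 0) := by
        intro p hp
        rcases List.mem_append.mp hp with hp | hp <;>
          simp only [List.mem_map, List.mem_range, List.mem_range'_1] at hp <;>
          obtain ⟨x, hx, rfl⟩ := hp <;> simp <;> omega
      have := foldStarts_agree matrix aux R C hRa hCa _ aux _ hts agree_aux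
      refine agree_congr (fun a b => ?_) this
      constructor
      · rintro (h | ⟨p, hp, k, hk⟩)
        · exact h.elim
        · exact ⟨hk.2.2.1, hk.2.2.2⟩
      · rintro ⟨ha, hb⟩
        right
        by_cases hab : b ≤ a
        · refine ⟨(a - b, 0), ?_, b, by omega⟩
          exact List.mem_append.mpr (Or.inl (List.mem_map.mpr ⟨a - b, List.mem_range.mpr (by omega), rfl⟩))
        · refine ⟨(0, b - a), ?_, a, by omega⟩
          exact List.mem_append.mpr (Or.inr (List.mem_map.mpr ⟨b - a, List.mem_range'_1.mpr (by omega), rfl⟩))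

-- ===== characterisation of A =====
lemma innerA (matrix aux : List (List Int)) (R C : Nat) (hR : R = matrix.length)
    (hC : C = (matrix.headD []).length)
    (hRa : R ≤ aux.length) (hCa : ∀ a < R, C ≤ rowlen aux a)
    (i : Nat) (hi : i < R) :
    ∀ (jm : Nat), jm ≤ C → ∀ (s : List (List Int)),
      Agree matrix aux (fun a b => a < i ∧ b < C) s →
      Agree matrix aux (fun a b => (a < i ∧ b < C) ∨ (a = i ∧ b < jm))
        ((List.range jm).foldl (fun s j =>
          if i = 0 ∨ j = 0 then set2 s i j (get2 matrix i j)
          else if get2 matrix i j = 1 ∧ get2 s (i-1) (j-1) > 0 then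
            set2 s i j (get2 s (i-1) (j-1) + 1)
          else set2 s i j (get2 matrix i j)) s) := by
  intro jm
  induction jm with
  | zero =>
    intro hjm s hs
    simp only [List.range_zero, List.foldl_nil]
    refine agree_congr (fun a b => ⟨fun h => Or.inl h, fun h => ?_⟩) hs
    rcases h with h | h
    · exact h
    · omega
  | succ jm ih =>
    intro hjm s hs
    rw [List.range_succ, List.foldl_append, List.foldl_cons, List.foldl_nil]
    have hprev := ih (by omega) s hs
    set s' := (List.range jm).foldl _ s with hs'
    have hwval : (if i = 0 ∨ jm = 0 then set2 s' i jm (get2 matrix i jm)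
        else if get2 matrix i jm = 1 ∧ get2 s' (i-1) (jm-1) > 0 then
          set2 s' i jm (get2 s' (i-1) (jm-1) + 1)
        else set2 s' i jm (get2 matrix i jm)) = set2 s' i jm (fval matrix i jm) := by
      by_cases hb : i = 0 ∨ jm = 0
      · rw [if_pos hb, fval_border matrix i jm hb]
      · rw [if_neg hb]
        push_neg at hb
        obtain ⟨i', rfl⟩ : ∃ i', i = i' + 1 := ⟨i - 1, by omega⟩
        obtain ⟨j', rfl⟩ : ∃ j', jm = j' + 1 := ⟨jm - 1, by omega⟩
        have hg : get2 s' i' j' = fval matrix i' j' :=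
          hprev.2.2.1 i' j' (Or.inl ⟨by omega, by omega⟩)
        simp only [Nat.add_sub_cancel, hg]
        rw [fval_succ]
        by_cases hcond : get2 matrix (i'+1) (j'+1) = 1 ∧ fval matrix i' j' > 0
        · rw [if_pos hcond, if_pos hcond]
        · rw [if_neg hcond, if_neg hcond]
    rw [hwval]
    have := agree_write hprev i jm (by omega) (by have := hCa i hi; omega)
    refine agree_congr (fun a b => ⟨?_, ?_⟩) this
    · rintro ((h | h) | h)
      · exact Or.inl h
      · right; omega
      · right; omega
    · rintro (h | h)
      · exact Or.inl (Or.inl h)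
      · by_cases hb : b < jm
        · left; right; omega
        · right; omega

lemma charA (matrix aux : List (List Int))
    (hRa : matrix.length ≤ aux.length)
    (hCa : ∀ a < matrix.length, (matrix.headD []).length ≤ rowlen aux a) :
    Agree matrix aux (fun a b => a < matrix.length ∧ b < (matrix.headD []).length)
      (traverse_from_top_left matrix aux) := by
  set R := matrix.length with hR
  set C := (matrix.headD []).length with hC
  have main : ∀ (im : Nat), im ≤ R →
      Agree matrix aux (fun a b => a < im ∧ b < C)
        ((List.range im).foldl (fun s i =>
          (List.range C).foldl (fun s j =>
            if i = 0 ∨ j = 0 then set2 s i j (get2 matrix i j)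
            else if get2 matrix i j = 1 ∧ get2 s (i-1) (j-1) > 0 then
              set2 s i j (get2 s (i-1) (j-1) + 1)
            else set2 s i j (get2 matrix i j)) s) aux) := by
    intro im
    induction im with
    | zero =>
      intro him
      simp only [List.range_zero, List.foldl_nil]
      exact ⟨rfl, fun a => rfl, fun a b h => by omega, fun a b _ => rfl⟩
    | succ im ih =>
      intro him
      rw [List.range_succ, List.foldl_append, List.foldl_cons, List.foldl_nil]
      have hprev := ih (by omega)
      have := innerA matrix aux R C hR hC hRa hCa im (by omega) C (le_refl C) _ hprev
      refine agree_congr (fun a b => ⟨?_, ?_⟩) this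
      · rintro (h | h)
        · constructor <;> omega
        · constructor <;> omega
      · rintro ⟨ha, hb⟩
        by_cases hai : a < im
        · left; exact ⟨hai, hb⟩
        · right; constructor <;> omega
  exact main R (le_refl R)

-- ===== VERDICT (by name: the statement is the Claim_ definition above) =====
theorem traverse_from_top_left_spec : Claim_equal_traverse_from_top_left := by
  intro matrix aux hdom hpre
  unfold Spec_traverse_from_top_left
  obtain ⟨hRa, hall⟩ := hpre
  have hCa : ∀ a < matrix.length, (matrix.headD []).length ≤ rowlen aux a :=
    fun a ha => (hall a ha).2
  obtain ⟨l1, w1, f1, g1⟩ := charA matrix aux hRa hCa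
  obtain ⟨l2, w2, f2, g2⟩ := charB matrix aux hRa hCa
  have hget : ∀ a b, get2 (traverse_from_top_left matrix aux) a b
      = get2 (traverse_from_top_left_alt matrix aux) a b := by
    intro a b
    by_cases h : a < matrix.length ∧ b < (matrix.headD []).length
    · rw [f1 a b h, f2 a b h]
    · rw [g1 a b h, g2 a b h]
  apply List.ext_getElem (by omega)
  intro a ha1 ha2
  apply List.ext_getElem
  · have := w1 a; have := w2 a
    simp only [rowlen, List.getD, List.getElem?_eq_getElem, ha1, ha2, Option.getD_some] at *
    omega
  · intro b hb1 hb2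
    have := hget a b
    simp only [get2, List.getD, List.getElem?_eq_getElem, ha1, ha2, hb1, hb2, Option.getD_some] at this
    exact this
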